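-- pv_equiv track=rewrite | github.com/noahmorin/nCipher-symmetric-encryption-cipher | main.py | n_cipher
-- ===== SOURCE A (Python) =====
-- def n_cipher(plntxt, keystr):
--     charValueList = [ord(c) for c in plntxt]  # convert plaintext into a list of decimal ascii values (i.e a -> 97)
--     keyList = [ord(k) for k in keystr]  # convert plaintext key into a list of decimal ascii values
--     cryptedlist = []
--     keypos = 0
--     encryptedString = ''
--     # define two emtpy variables and an emtpy list to be used later in the function
--
--     for v in range(len(charValueList)):  # for loop that iterated through charValueList with an integer variable v
--         if charValueList[v] + (keyList[keypos]) >= 253: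
--             cryptedlist.append([(charValueList[v]), "x"])
--         # if the decimal value of the current character in charVaulueList + the decimal value of the current key
--         # character is greater than or equal to 253, assume it is not within the printable range of characters and
--         # append it to the list with an "x" flag
--         elif 253 > charValueList[v] + (keyList[keypos]) >= 180:
--             cryptedlist.append([(charValueList[v] + (keyList[keypos] - 127)), "a"])
--         # repeated step from last, else if the sum of the two decimal values are less than 253 and greater than or equal
--         # to 180, append the sum of the two values - 127 with the "a" flag.
--         elif 180 > charValueList[v] + (keyList[keypos]) >= 155:
--             cryptedlist.append([(charValueList[v] + (keyList[keypos] - 97)), "b"])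
--         # repeated step from last, else if the sum of the two decimal values are less than 180 and greater than or equal
--         # to 155, append the sum of the two values - 97 with the "b" flag.
--         else:
--             cryptedlist.append([(charValueList[v] + (keyList[keypos] - 31)), "c"])
--         # repeated step from last, else the sum of the two decimal values are less than 180 and greater than or equal to
--         # 155, append the sum of the two values - 97 with the "b" flag.
--         if keypos < 15:
--             keypos += 1
--         else:
--             keypos = 0
--         # As the for loop cycles through the charValueList, increment through the key
--
--     for pair in cryptedlist:  # for loop that cylces through the pairs of characters and flags in cryptedlist
--         for item in pair:  # for loop that cycles through the two items in the pair
--             if type(item) == int: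
--                 # if the character in question is an integer, decode the string from a decimal to an ascii value
--                 # and append it to the encryptedString
--                 encryptedString += chr(item)
--             else:
--                 # else, at the unencoded character to the encrypted string
--                 encryptedString += item
--
--     return encryptedString  # return the encrypted string
-- ===== SOURCE B (Python) =====
-- def n_cipher(plntxt, keystr):
--     def entry(code, k):
--         s = code + k
--         if s >= 253:
--             return (code, "x")
--         if s >= 180:
--             return (s - 127, "a")
--         if s >= 155:
--             return (s - 97, "b")
--         return (s - 31, "c")
--
--     # precompute one substitution row per key slot, over the whole ASCII alphabet
--     tables = [[entry(code, ord(keystr[slot])) for code in range(128)]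
--               for slot in range(min(len(plntxt), 16))]
--     out = []
--     for v, ch in enumerate(plntxt):
--         code, flag = tables[v % 16][ord(ch)]
--         out.append(chr(code) + flag)
--     return "".join(out)
-- ===== Notes on version B (the rewrite author's own statement) =====
-- stated objective: alternative
-- what changed: B precomputes one substitution row per key slot over the whole 128-code ASCII alphabet (numeric code + flag per entry) and then encrypts the plaintext by pure table lookup joined at the end, instead of A's per-character arithmetic pass followed by a type-dispatching flattening pass over a tagged intermediate list.
import Mathlib
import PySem

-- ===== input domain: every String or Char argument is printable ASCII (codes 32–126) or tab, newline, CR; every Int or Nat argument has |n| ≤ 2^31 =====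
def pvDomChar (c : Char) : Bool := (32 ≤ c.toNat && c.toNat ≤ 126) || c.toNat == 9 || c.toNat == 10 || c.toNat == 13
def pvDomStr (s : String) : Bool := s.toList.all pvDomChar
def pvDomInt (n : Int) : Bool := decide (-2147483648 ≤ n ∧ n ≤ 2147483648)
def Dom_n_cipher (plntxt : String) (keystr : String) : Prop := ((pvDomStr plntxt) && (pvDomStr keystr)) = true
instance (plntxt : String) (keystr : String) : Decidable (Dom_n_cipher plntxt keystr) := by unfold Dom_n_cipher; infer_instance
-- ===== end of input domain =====

-- B replaces A's per-character arithmetic pass + type-dispatching flattening pass by precomputed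
-- per-key-slot substitution tables over the 128-code ASCII alphabet, then pure table lookup
-- (objective: alternative; same behaviour on Pre_).

-- ===== PORT A =====
-- first loop of A: walk charValueList with keypos state, appending [value, flag] pairs.
-- keyList[keypos] is in range on Pre_ (Python raises IndexError otherwise, excluded by Pre_).
def nCipherPhase1 (cs : List Int) (keyList : List Int) (keypos : Nat)
    (acc : List (Int × String)) : List (Int × String) :=
  match cs with
  | [] => acc
  | c :: rest =>
    let k := keyList.getD keypos 0
    let pair : Int × String :=
      if c + k ≥ 253 then (c, "x")
      else if c + k ≥ 180 then (c + (k - 127), "a")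
      else if c + k ≥ 155 then (c + (k - 97), "b")
      else (c + (k - 31), "c")
    nCipherPhase1 rest keyList (if keypos < 15 then keypos + 1 else 0) (acc ++ [pair])

-- second loop of A: for each pair append chr(int item) then the flag string.
-- chr(n) ported as Char.ofNat n.toNat; exact on Pre_ (sum ≥ 31 keeps the argument a valid code point).
def nCipherPhase2 (pairs : List (Int × String)) (encryptedString : List Char) : List Char :=
  match pairs with
  | [] => encryptedString
  | (n, f) :: rest => nCipherPhase2 rest (encryptedString ++ [Char.ofNat n.toNat] ++ f.toList)

def n_cipher (plntxt : String) (keystr : String) : String :=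
  let charValueList : List Int := plntxt.toList.map (fun c => (c.toNat : Int))
  let keyList : List Int := keystr.toList.map (fun c => (c.toNat : Int))
  let cryptedlist := nCipherPhase1 charValueList keyList 0 []
  String.mk (nCipherPhase2 cryptedlist [])

-- ===== PORT B =====
-- Source B's entry(code, k): the (numeric code, flag) table entry for one alphabet code under key value k.
def nCipherEntry (code k : Int) : Int × List Char :=
  let s := code + k
  if s ≥ 253 then (code, ['x'])
  else if s ≥ 180 then (s - 127, ['a'])
  else if s ≥ 155 then (s - 97, ['b'])
  else (s - 31, ['c'])

-- Source B: tables = one substitution row per key slot over codes 0..127, then translate by lookup.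
-- chr(code) ported as Char.ofNat code.toNat, exact on Pre_ (code ≥ 0 there); ''.join via flatMap.
def n_cipher_alt (plntxt : String) (keystr : String) : String :=
  let cs := plntxt.toList
  let ks := keystr.toList
  let tables : List (List (Int × List Char)) :=
    (PySem.List.pyRange 0 ((min cs.length 16 : Nat) : Int) 1).map (fun slot =>
      (PySem.List.pyRange 0 128 1).map (fun code =>
        nCipherEntry code ((ks.getD slot.toNat ' ').toNat : Int)))
  String.mk ((PySem.List.enumerate cs 0).flatMap (fun p =>
    let e := PySem.List.pyGetD
      (PySem.List.pyGetD tables (PySem.Int.mod p.1 16) []) ((p.2.toNat : Nat) : Int) (0, [])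
    Char.ofNat e.1.toNat :: e.2))

-- ===== PRECONDITION & SPEC =====
-- Pre_ = exactly the inputs where Python A returns: the key is long enough for the 0..15 key
-- cycling (else IndexError), and every char+key sum is ≥ 31 (else chr gets a negative: ValueError).
def Pre_n_cipher (plntxt : String) (keystr : String) : Prop :=
  min plntxt.toList.length 16 ≤ keystr.toList.length ∧
  ∀ i < plntxt.toList.length,
    31 ≤ (plntxt.toList.getD i ' ').toNat + (keystr.toList.getD (i % 16) ' ').toNat
instance (plntxt : String) (keystr : String) : Decidable (Pre_n_cipher plntxt keystr) := by
  unfold Pre_n_cipher; infer_instance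

def pvWitness_n_cipher : String × String := ("hello, world", "0123456789abcdef")

def Spec_n_cipher (plntxt : String) (keystr : String) (out : String) : Prop := out = n_cipher_alt plntxt keystr
instance (plntxt : String) (keystr : String) (out : String) : Decidable (Spec_n_cipher plntxt keystr out) := by unfold Spec_n_cipher; infer_instance

-- ===== CLAIM (what is proved, stated in full; the proofs are below) =====
def Claim_equal_n_cipher : Prop := ∀ (plntxt : String) (keystr : String), Dom_n_cipher plntxt keystr → Pre_n_cipher plntxt keystr → Spec_n_cipher plntxt keystr (n_cipher plntxt keystr)

-- ===== LEMMAS AND PROOFS =====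

-- proof-only reference loop: the per-index four-way branch, key slot v % 16.
def idealLoop (cs key : List Char) (v : Nat) : List Char :=
  match cs with
  | [] => []
  | ch :: rest =>
    let s : Int := (ch.toNat : Int) + ((key.getD (v % 16) ' ').toNat : Int)
    (if s ≥ 253 then [ch, 'x']
     else if s ≥ 180 then [Char.ofNat (s - 127).toNat, 'a']
     else if s ≥ 155 then [Char.ofNat (s - 97).toNat, 'b']
     else [Char.ofNat (s - 31).toNat, 'c']) ++ idealLoop rest key (v + 1)

-- phase 2 distributes over the accumulator: it is a flatMap.
theorem nCipherPhase2_eq (pairs : List (Int × String)) (acc : List Char) :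
    nCipherPhase2 pairs acc = acc ++ pairs.flatMap (fun p => Char.ofNat p.1.toNat :: p.2.toList) := by
  induction pairs generalizing acc with
  | nil => simp [nCipherPhase2]
  | cons p rest ih => cases p; simp [nCipherPhase2, ih]

-- phase 1 pulls its accumulator out front.
theorem nCipherPhase1_acc (cs keyList : List Int) (keypos : Nat) (acc : List (Int × String)) :
    nCipherPhase1 cs keyList keypos acc = acc ++ nCipherPhase1 cs keyList keypos [] := by
  induction cs generalizing keypos acc with
  | nil => simp [nCipherPhase1]
  | cons c rest ih =>
    simp only [nCipherPhase1]
    rw [ih]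
    conv_rhs => rw [ih]
    simp

-- the keypos update is mod-16 stepping.
theorem keypos_step (v : Nat) :
    (if v % 16 < 15 then v % 16 + 1 else 0) = (v + 1) % 16 := by
  split_ifs <;> omega

-- A side: flattening phase 1's output equals the reference loop, with keypos = v % 16.
theorem a_core (cs key : List Char) (v : Nat)
    (hk : ∀ i < v + cs.length, i % 16 < key.length) :
    (nCipherPhase1 (cs.map (fun c => (c.toNat : Int))) (key.map (fun c => (c.toNat : Int))) (v % 16) []).flatMap
        (fun p => Char.ofNat p.1.toNat :: p.2.toList)
      = idealLoop cs key v := by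
  induction cs generalizing v with
  | nil => simp [nCipherPhase1, idealLoop]
  | cons ch rest ih =>
    have hv16 : v % 16 < key.length := hk v (by simp)
    have hkey : (key.map (fun c => (c.toNat : Int))).getD (v % 16) 0
        = ((key.getD (v % 16) ' ').toNat : Int) := by
      rw [List.getD_eq_getElem?_getD, List.getD_eq_getElem?_getD,
        List.getElem?_map, List.getElem?_eq_getElem hv16]
      simp
    simp only [List.map_cons, nCipherPhase1, idealLoop]
    rw [nCipherPhase1_acc, keypos_step]
    simp only [List.nil_append, List.flatMap_append, List.flatMap_cons, List.flatMap_nil]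
    rw [ih (v + 1) (fun i hi => hk i (by simp at hi ⊢; omega))]
    simp only [hkey]
    set k : Int := ((key.getD (v % 16) ' ').toNat : Int) with hkdef
    split_ifs with h1 h2 h3
    · simp [Char.ofNat_toNat]
    · have : ((ch.toNat : Int) + (k - 127)) = ((ch.toNat : Int) + k) - 127 := by ring
      simp [this]
    · have : ((ch.toNat : Int) + (k - 97)) = ((ch.toNat : Int) + k) - 97 := by ring
      simp [this]
    · have : ((ch.toNat : Int) + (k - 31)) = ((ch.toNat : Int) + k) - 31 := by ring
      simp [this]

-- B side: translating through the precomputed tables equals the reference loop.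
theorem b_core (cs key : List Char) (nslots : Nat) (v : Nat)
    (hns : ∀ i < cs.length, (v + i) % 16 < nslots)
    (hch : ∀ ch ∈ cs, ch.toNat < 128) :
    (PySem.List.enumerate cs (v : Int)).flatMap (fun p =>
      let e := PySem.List.pyGetD
        (PySem.List.pyGetD
          ((PySem.List.pyRange 0 ((nslots : Nat) : Int) 1).map (fun slot =>
            (PySem.List.pyRange 0 128 1).map (fun code =>
              nCipherEntry code ((key.getD slot.toNat ' ').toNat : Int))))
          (PySem.Int.mod p.1 16) []) ((p.2.toNat : Nat) : Int) (0, [])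
      Char.ofNat e.1.toNat :: e.2)
      = idealLoop cs key v := by
  induction cs generalizing v with
  | nil => simp [PySem.List.enumerate, idealLoop]
  | cons ch rest ih =>
    rw [PySem.List.enumerate_cons]
    simp only [List.flatMap_cons]
    have hmod : PySem.Int.mod (v : Int) 16 = (((v % 16 : Nat) : Nat) : Int) := by
      simp
    have hv16 : v % 16 < nslots := by simpa using hns 0 (by simp)
    have hrow := PySem.List.pyGetD_map_pyRange
      (fun slot => (PySem.List.pyRange 0 128 1).map (fun code =>
        nCipherEntry code ((key.getD slot.toNat ' ').toNat : Int)))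
      nslots (v % 16) ([] : List (Int × List Char)) hv16
    have hcell := PySem.List.pyGetD_map_pyRange
      (fun code => nCipherEntry code ((key.getD ((v % 16 : Nat) : Int).toNat ' ').toNat : Int))
      128 ch.toNat ((0 : Int), ([] : List Char)) (hch ch (by simp))
    have hstep : (v : Int) + 1 = ((v + 1 : Nat) : Int) := by push_cast; ring
    simp only [Nat.cast_ofNat] at hcell
    rw [hmod, hrow]
    beta_reduce
    rw [hcell, hstep,
      ih (v + 1) (fun i hi => by
          have := hns (i + 1) (by simpa using Nat.succ_lt_succ hi)
          simpa [Nat.add_assoc, Nat.add_comm 1 i] using this)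
        (fun c hc => hch c (by simp [hc]))]
    simp only [idealLoop, nCipherEntry, Int.toNat_natCast]
    split_ifs with h1 h2 h3
    · simp [Char.ofNat_toNat]
    · rfl
    · rfl
    · rfl

-- ===== VERDICT (by name: the statement is the Claim_ definition above) =====
theorem n_cipher_spec : Claim_equal_n_cipher := by
  intro plntxt keystr hdom hpre
  obtain ⟨hlen, _⟩ := hpre
  show n_cipher plntxt keystr = n_cipher_alt plntxt keystr
  simp only [n_cipher, n_cipher_alt]
  rw [nCipherPhase2_eq]
  simp only [List.nil_append]
  congr 1
  have hA : ∀ i < 0 + plntxt.toList.length, i % 16 < keystr.toList.length := by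
    intro i hi
    have h16 : i % 16 < 16 := Nat.mod_lt _ (by norm_num)
    have hle : i % 16 ≤ i := Nat.mod_le _ _
    omega
  have h0 : (0 : Nat) % 16 = 0 := by norm_num
  rw [← h0, a_core plntxt.toList keystr.toList 0 hA]
  have hch : ∀ ch ∈ plntxt.toList, ch.toNat < 128 := by
    intro ch hc
    have hd : pvDomStr plntxt = true := by
      unfold Dom_n_cipher at hdom; exact (Bool.and_eq_true _ _ |>.mp hdom).1
    have := List.all_eq_true.mp hd ch hc
    simp only [pvDomChar, Bool.or_eq_true, Bool.and_eq_true, beq_iff_eq,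
      decide_eq_true_eq] at this
    omega
  have hns : ∀ i < plntxt.toList.length, (0 + i) % 16 < min plntxt.toList.length 16 := by
    intro i hi
    have h16 : i % 16 < 16 := Nat.mod_lt _ (by norm_num)
    have hle : i % 16 ≤ i := Nat.mod_le _ _
    omega
  exact (b_core plntxt.toList keystr.toList (min plntxt.toList.length 16) 0 hns hch).symm
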